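-- pv_equiv track=rewrite | github.com/HyeongjinKim98/Backjoon | 프로그래머스/unrated/135808. 과일 장수/과일 장수.py | solution
-- ===== SOURCE A (Python) =====
-- def solution(k, m, score):
--     answer = 0
--     apple = sorted(score,reverse = True)
--     box =[apple[i:i+m] for i in range(0,len(apple),m)
--           if len(apple[i:i+m])==m ]
--     for i in box:
--         answer += min(i)*len(i)
--     return answer
-- ===== SOURCE B (Python) =====
-- def solution(k, m, score):
--     # Frequency-counter / run-length approach: count each score once, sort only
--     # the distinct values, and count arithmetically how many complete-box minima
--     # fall inside each value's run of the ascending order (positions r, r+m, ...,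
--     # where r = n % m), so no per-element chunking or min scan is needed.
--     counts = {}
--     for s in score:
--         counts[s] = counts.get(s, 0) + 1
--     n = len(score)
--     r = n % m
--     answer = 0
--     p = 0
--     for v in sorted(counts):
--         c = counts[v]
--         hi = (p + c - r + m - 1) // m if p + c > r else 0
--         lo = (p - r + m - 1) // m if p > r else 0
--         answer += v * (hi - lo)
--         p += c
--     return answer * m
-- ===== Notes on version B (the rewrite author's own statement) =====
-- stated objective: alternative
-- what changed: B replaces chunking-and-min over the fully sorted list by a frequency counter: it sorts only the distinct values and computes arithmetically, per value run, how many complete-box minimum positions (r, r+m, ... in ascending order) the run covers.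
-- outside the precondition, e.g. on solution(4, -2, [1, 2, 3]): A returns 0, B returns 8
import Mathlib
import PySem

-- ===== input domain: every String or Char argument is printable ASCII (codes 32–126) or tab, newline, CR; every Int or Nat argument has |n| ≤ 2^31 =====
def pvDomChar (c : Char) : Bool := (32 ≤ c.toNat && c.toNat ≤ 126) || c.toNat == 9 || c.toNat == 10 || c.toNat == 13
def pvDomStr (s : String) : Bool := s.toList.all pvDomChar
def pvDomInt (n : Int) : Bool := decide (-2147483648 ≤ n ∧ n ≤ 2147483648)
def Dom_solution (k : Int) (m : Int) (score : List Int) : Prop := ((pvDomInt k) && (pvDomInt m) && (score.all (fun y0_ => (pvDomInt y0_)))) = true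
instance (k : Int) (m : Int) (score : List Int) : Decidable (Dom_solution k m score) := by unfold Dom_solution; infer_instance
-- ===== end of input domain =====

-- B replaces sort-chunk-min by a frequency counter: it sorts only the distinct values and
-- counts arithmetically, per value run, how many complete-box minimum positions the run covers.

-- ===== PORT A =====
def solution (k : Int) (m : Int) (score : List Int) : Int :=
  let answer : Int := 0
  let apple := PySem.List.sorted score (fun x => x) true
  let box := (PySem.List.pyRange 0 (PySem.List.len apple) m).foldl
    (fun acc i =>
      if PySem.List.len (PySem.List.slice apple (some i) (some (i + m))) = m then
        acc ++ [PySem.List.slice apple (some i) (some (i + m))]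
      else acc) []
  box.foldl (fun answer i =>
    answer + (PySem.List.min? i (fun x => x)).getD 0 * PySem.List.len i) answer

-- ===== PORT B =====
def solution_alt (k : Int) (m : Int) (score : List Int) : Int :=
  let counts := score.foldl (fun d s => d.insert s (d.getD s 0 + 1)) (PySem.Dict.empty : PySem.Dict Int Int)
  let n := PySem.List.len score
  let r := PySem.Int.mod n m
  let res := (PySem.List.sorted counts.keys (fun x => x) false).foldl
    (fun (st : Int × Int) v =>
      let c := counts.getD v 0
      let hi := if r < st.2 + c then PySem.Int.floordiv (st.2 + c - r + m - 1) m else 0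
      let lo := if r < st.2 then PySem.Int.floordiv (st.2 - r + m - 1) m else 0
      (st.1 + v * (hi - lo), st.2 + c)) ((0 : Int), (0 : Int))
  res.1 * m

-- ===== PRECONDITION & SPEC =====
-- Pre_ restricts to the natural domain m ≥ 1 (a box size): A raises ValueError for m == 0
-- (range step 0), and for negative m A returns 0 vacuously while B's modular-count
-- arithmetic is not meaningful there (see claim.json cites).
def Pre_solution (k : Int) (m : Int) (score : List Int) : Prop := 1 ≤ m
instance (k : Int) (m : Int) (score : List Int) : Decidable (Pre_solution k m score) := by unfold Pre_solution; infer_instance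
def pvWitness_solution : Int × Int × List Int := (4, 3, [1, 2, 3, 1, 2])

def Spec_solution (k : Int) (m : Int) (score : List Int) (out : Int) : Prop := out = solution_alt k m score
instance (k : Int) (m : Int) (score : List Int) (out : Int) : Decidable (Spec_solution k m score out) := by unfold Spec_solution; infer_instance

-- ===== CLAIM (what is proved, stated in full; the proofs are below) =====
def Claim_equal_solution : Prop := ∀ (k : Int) (m : Int) (score : List Int), Dom_solution k m score → Pre_solution k m score → Spec_solution k m score (solution k m score)

-- ===== LEMMAS AND PROOFS =====

-- ---------- A-side: the chunked fold is the sum of block minima ----------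

theorem filter_range_lt (q cnt : Nat) (h : q ≤ cnt) :
    (List.range cnt).filter (fun kk => decide (kk < q)) = List.range q := by
  obtain ⟨t, rfl⟩ := Nat.exists_eq_add_of_le h
  rw [List.range_add, List.filter_append, List.filter_eq_self.mpr, List.filter_eq_nil_iff.mpr, List.append_nil]
  · intro x hx; simp at hx ⊢; omega
  · intro x hx; simp [List.mem_range] at hx ⊢; omega

theorem getLast_le_of_antitone (c : List Int) : ∀ (h : c ≠ []), List.Pairwise (fun a b => b ≤ a) c → ∀ x ∈ c, c.getLast h ≤ x := by
  induction c with
  | nil => intro h; simp at h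
  | cons y t ih =>
    intro h hp x hx
    by_cases ht : t = []
    · subst ht; simp at hx; subst hx; simp
    · rw [List.getLast_cons ht]
      rcases List.mem_cons.mp hx with rfl | hx'
      · exact (List.pairwise_cons.mp hp).1 _ (List.getLast_mem ht)
      · exact ih ht hp.of_cons _ hx'

theorem min_chunk (d : List Int) (hd : List.Pairwise (fun a b => b ≤ a) d) (i M : Nat)
    (hM : 0 < M) (hle : i + M ≤ d.length) :
    (PySem.List.min? (List.take M (List.drop i d)) (fun x => x)).getD 0 = d.getD (i + M - 1) 0 := by
  set c := List.take M (List.drop i d) with hc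
  have hlen : c.length = M := by simp [hc]; omega
  have hne : c ≠ [] := by intro h; rw [h] at hlen; simp at hlen; omega
  have hcp : List.Pairwise (fun a b => b ≤ a) c :=
    hd.sublist ((List.take_sublist _ _).trans (List.drop_sublist _ _))
  obtain ⟨v, hv⟩ : ∃ v, PySem.List.min? c (fun x => x) = some v := by
    rcases h : PySem.List.min? c (fun x => x) with _ | v
    · exact absurd ((PySem.List.min?_eq_none_iff c _).mp h) hne
    · exact ⟨v, rfl⟩
  have hvm : v ∈ c := PySem.List.min?_mem hv
  have hmin : ∀ y ∈ c, v ≤ y := PySem.List.min?_isMin hv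
  have hveq : v = c.getLast hne :=
    le_antisymm (hmin _ (List.getLast_mem hne)) (getLast_le_of_antitone c hne hcp v hvm)
  have hgl : c.getLast hne = d.getD (i + M - 1) 0 := by
    rw [List.getLast_eq_getElem, List.getD_eq_getElem _ _ (by omega)]
    simp only [hc, List.getElem_take, List.getElem_drop]
    congr 1
    simp [hc]
    omega
  rw [hv, Option.getD_some, hveq, hgl]

theorem Aside (d : List Int) (hdp : List.Pairwise (fun x y => y ≤ x) d) (M : Nat) (hM : 0 < M) :
    List.foldl (fun ans c => ans + (PySem.List.min? c (fun x => x)).getD 0 * PySem.List.len c) 0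
      (List.foldl (fun acc i =>
        if PySem.List.len (PySem.List.slice d (some i) (some (i + (M:Int)))) = (M:Int)
        then acc ++ [PySem.List.slice d (some i) (some (i + (M:Int)))] else acc) []
        (PySem.List.pyRange 0 (PySem.List.len d) (M:Int)))
    = ((List.range (d.length / M)).map (fun kk => d.getD (M*kk + M - 1) 0 * (M:Int))).sum := by
  set n := d.length with hn
  set q := n / M with hq
  have hslice : ∀ kk : Nat, PySem.List.slice d (some ((0:Int) + (M:Int)*(kk:Int)))
      (some ((0:Int) + (M:Int)*(kk:Int) + (M:Int))) = List.take M (List.drop (M*kk) d) := by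
    intro kk
    have h1 : (0:Int) + (M:Int)*(kk:Int) = ((M*kk : Nat):Int) := by push_cast; ring
    have h2 : (0:Int) + (M:Int)*(kk:Int) + (M:Int) = ((M*kk + M : Nat):Int) := by push_cast; ring
    rw [h2, h1, PySem.List.slice_toNat d (by positivity) (by positivity),
      Int.toNat_natCast, Int.toNat_natCast]
    congr 1
    omega
  have hlen : ∀ kk : Nat, (List.take M (List.drop (M*kk) d)).length = min M (n - M*kk) := by
    intro kk; simp [hn]
  have hdiv : ∀ kk : Nat, kk < q ↔ M * kk + M ≤ n := by
    intro kk
    rw [hq, Nat.lt_iff_add_one_le, Nat.le_div_iff_mul_le hM,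
      show (kk + 1) * M = M * kk + M from by ring]
  rw [PySem.List.pyRange_of_pos 0 (PySem.List.len d) (by exact_mod_cast hM : (0:Int) < (M:Int))]
  rw [PySem.List.foldl_append_ite
      (p := fun i : Int => PySem.List.len (PySem.List.slice d (some i) (some (i + (M:Int)))) = (M:Int))
      (f := fun i : Int => PySem.List.slice d (some i) (some (i + (M:Int))))]
  rw [List.nil_append, List.filter_map, PySem.List.foldl_add, zero_add, List.map_map, List.map_map]
  set cnt := (if (0:Int) < PySem.List.len d
      then ((PySem.List.len d - 0 + (M:Int) - 1) / (M:Int)).toNat else 0) with hcnt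
  have hqcnt : q ≤ cnt := by
    rw [hcnt, PySem.List.len_eq, ← hn]
    by_cases hn0 : 0 < n
    · rw [if_pos (by exact_mod_cast hn0)]
      rw [show ((n:Int) - 0 + (M:Int) - 1) = ((n + M - 1 : Nat) : Int) from by omega]
      rw [← Int.natCast_ediv, Int.toNat_natCast]
      exact Nat.div_le_div_right (by omega)
    · have : q = 0 := by rw [hq, show n = 0 from by omega]; simp
      omega
  have hcond : ∀ kk : Nat, kk ∈ List.range cnt →
      ((fun i : Int => decide (PySem.List.len (PySem.List.slice d (some i) (some (i + (M:Int)))) = (M:Int))) ∘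
        (fun k : Nat => (0:Int) + (M:Int) * (k:Int))) kk = decide (kk < q) := by
    intro kk _
    simp only [Function.comp_apply, hslice kk, PySem.List.len_eq, hlen kk]
    rw [decide_eq_decide, Nat.cast_inj, hdiv kk]
    generalize M * kk = P
    omega
  rw [List.filter_congr hcond, filter_range_lt q cnt hqcnt]
  congr 1
  apply List.map_congr_left
  intro kk hkk
  rw [List.mem_range] at hkk
  have hle : M * kk + M ≤ n := (hdiv kk).mp hkk
  simp only [Function.comp_apply, hslice kk, PySem.List.len_eq, hlen kk]
  rw [min_chunk d hdp (M*kk) M hM (by omega)]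
  rw [show min M (n - M*kk) = M from by generalize hP : M * kk = P at hle ⊢; omega]

-- ---------- B-side: run counting via the counter equals the sum over minimum positions ----------

-- Fm r m p: the port's closed-form count of complete-box minimum positions below p
def Fm (r m p : Int) : Int := if r < p then PySem.Int.floordiv (p - r + m - 1) m else 0

-- sum of the elements of E (starting at absolute position p) sitting at a minimum position
def gsum (r m : Nat) : Nat → List Int → Int
  | _, [] => 0
  | p, x :: t => (if r ≤ p ∧ (p - r) % m = 0 then x else 0) + gsum r m (p + 1) t

theorem Fm_step (r m p : Int) (hm : 0 < m) :
    Fm r m (p + 1) - Fm r m p = if r ≤ p ∧ (p - r) % m = 0 then 1 else 0 := by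
  have hm' : m ≠ 0 := by omega
  unfold Fm
  by_cases hpr : r ≤ p
  · obtain ⟨a, b, hab, hb0, hbm⟩ : ∃ a b : Int, m * a + b = p - r ∧ 0 ≤ b ∧ b < m :=
      ⟨(p - r) / m, (p - r) % m, Int.ediv_add_emod _ _, Int.emod_nonneg _ hm', Int.emod_lt_of_pos _ hm⟩
    have hmodeq : (p - r) % m = b := by
      rw [show p - r = b + m * a by linear_combination -hab, Int.add_mul_emod_self_left,
        Int.emod_eq_of_lt hb0 hbm]
    simp only [hmodeq]
    have e1 : PySem.Int.floordiv (p + 1 - r + m - 1) m = 1 + a := by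
      rw [PySem.Int.floordiv_eq_ediv_of_pos hm,
        show p + 1 - r + m - 1 = (b + m) + a * m by linear_combination -hab,
        Int.add_mul_ediv_right _ _ hm',
        show b + m = b + 1 * m by ring, Int.add_mul_ediv_right _ _ hm',
        Int.ediv_eq_zero_of_lt hb0 hbm]
      omega
    rw [if_pos (by omega : r < p + 1), e1]
    by_cases hp2 : r < p
    · rw [if_pos hp2]
      by_cases hbz : b = 0
      · have e2 : PySem.Int.floordiv (p - r + m - 1) m = a := by
          rw [PySem.Int.floordiv_eq_ediv_of_pos hm,
            show p - r + m - 1 = (b + m - 1) + a * m by linear_combination -hab,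
            Int.add_mul_ediv_right _ _ hm',
            Int.ediv_eq_zero_of_lt (by omega) (by omega)]
          omega
        rw [e2, if_pos ⟨hpr, hbz⟩]; omega
      · have e2 : PySem.Int.floordiv (p - r + m - 1) m = 1 + a := by
          rw [PySem.Int.floordiv_eq_ediv_of_pos hm,
            show p - r + m - 1 = (b - 1) + (1 + a) * m by linear_combination -hab,
            Int.add_mul_ediv_right _ _ hm',
            Int.ediv_eq_zero_of_lt (by omega) (by omega)]
          omega
        rw [e2, if_neg (fun h => hbz h.2)]; omega
    · have hb' : b = 0 := by
        have hpe : p = r := by omega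
        rw [← hmodeq, hpe]; simp
      have ha' : a = 0 := by
        have hma : m * a = 0 := by omega
        rcases mul_eq_zero.mp hma with h | h
        · omega
        · exact h
      rw [if_neg hp2, if_pos ⟨hpr, hb'⟩]
      omega
  · rw [if_neg (by omega : ¬ r < p + 1), if_neg (by omega : ¬ r < p),
      if_neg (fun h => hpr h.1)]
    omega

theorem cond_cast (r m p : Nat) :
    ((r:Int) ≤ (p:Int) ∧ ((p:Int) - (r:Int)) % (m:Int) = 0) ↔ (r ≤ p ∧ (p - r) % m = 0) := by
  by_cases h : r ≤ p
  · have h1 : ((p:Int) - (r:Int)) = ((p - r : Nat) : Int) := by omega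
    rw [h1, ← Int.natCast_mod]
    constructor
    · rintro ⟨_, h2⟩; exact ⟨h, by exact_mod_cast h2⟩
    · rintro ⟨_, h2⟩; exact ⟨by exact_mod_cast h, by exact_mod_cast h2⟩
  · constructor
    · rintro ⟨h1, _⟩; exact absurd (by exact_mod_cast h1) h
    · rintro ⟨h1, _⟩; exact absurd h1 h

theorem gsum_replicate (r m : Nat) (hm : 0 < m) (v : Int) :
    ∀ (c p : Nat), v * (Fm r m (p + c : Nat) - Fm r m p) = gsum r m p (List.replicate c v) := by
  intro c
  induction c with
  | zero => intro p; simp [gsum]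
  | succ c ih =>
    intro p
    rw [List.replicate_succ]
    show v * (Fm r m ((p + (c+1) : Nat) : Int) - Fm r m p) =
      (if r ≤ p ∧ (p - r) % m = 0 then v else 0) + gsum r m (p + 1) (List.replicate c v)
    rw [← ih (p + 1)]
    have hc1 : ((p + (c + 1) : Nat) : Int) = ((p + 1 + c : Nat) : Int) := by push_cast; ring
    have hstep := Fm_step r m p (by exact_mod_cast hm)
    have hp1 : ((p + 1 : Nat) : Int) = (p : Int) + 1 := by push_cast; ring
    rw [hc1]
    have hsplit : v * (Fm r m ((p+1+c : Nat) : Int) - Fm r m p)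
        = v * (Fm r m ((p+1+c : Nat) : Int) - Fm r m ((p+1 : Nat) : Int))
          + v * (Fm r m ((p:Int) + 1) - Fm r m p) := by
      rw [hp1]; ring
    rw [hsplit, hstep]
    by_cases hcond : r ≤ p ∧ (p - r) % m = 0
    · rw [if_pos hcond, if_pos ((cond_cast r m p).mpr hcond)]; ring
    · rw [if_neg hcond, if_neg (fun h => hcond ((cond_cast r m p).mp h))]; ring

theorem gsum_append (r m : Nat) :
    ∀ (E1 E2 : List Int) (p : Nat),
      gsum r m p (E1 ++ E2) = gsum r m p E1 + gsum r m (p + E1.length) E2 := by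
  intro E1
  induction E1 with
  | nil => intro E2 p; simp [gsum]
  | cons x t ih =>
    intro E2 p
    simp only [List.cons_append, gsum, List.length_cons]
    rw [ih E2 (p + 1), show p + (t.length + 1) = p + 1 + t.length from by omega]
    ring

theorem gsum_zero_of (r m : Nat) :
    ∀ (E : List Int) (p : Nat),
      (∀ j, p ≤ j → j < p + E.length → ¬(r ≤ j ∧ (j - r) % m = 0)) → gsum r m p E = 0 := by
  intro E
  induction E with
  | nil => intro p _; simp [gsum]
  | cons x t ih =>
    intro p h
    simp only [gsum]
    rw [if_neg (h p (le_refl p) (by simp)), ih (p + 1) (fun j h1 h2 => h j (by omega) (by simp at h2 ⊢; omega))]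
    ring

theorem gsum_blocks (r m : Nat) (hm : 0 < m) :
    ∀ (q : Nat) (E : List Int) (kk0 : Nat), E.length = q * m →
      gsum r m (r + m * kk0) E = ((List.range q).map (fun kk => E.getD (m * kk) 0)).sum := by
  intro q
  induction q with
  | zero =>
    intro E kk0 hE
    have hE0 : E = [] := by
      cases E with
      | nil => rfl
      | cons x t => simp at hE
    subst hE0
    simp [gsum]
  | succ q ih =>
    intro E kk0 hE
    have hlen1 : E.length = q * m + m := by rw [hE]; ring
    obtain ⟨x, t, rfl⟩ : ∃ x t, E = x :: t := by
      cases E with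
      | nil => simp at hlen1; omega
      | cons x t => exact ⟨x, t, rfl⟩
    have hmle : m ≤ (x :: t).length := by omega
    have h := gsum_append r m (List.take m (x :: t)) (List.drop m (x :: t)) (r + m * kk0)
    rw [List.take_append_drop] at h
    rw [h]
    have htlen : (List.take m (x :: t)).length = m := by
      rw [List.length_take]; omega
    have hfirst : gsum r m (r + m * kk0) (List.take m (x :: t)) = x := by
      obtain ⟨mm, rfl⟩ : ∃ mm, m = mm + 1 := ⟨m - 1, by omega⟩
      rw [show List.take (mm + 1) (x :: t) = x :: List.take mm t from rfl]
      simp only [gsum]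
      rw [if_pos ⟨by omega, by
        rw [show r + (mm+1) * kk0 - r = (mm+1) * kk0 from by omega]
        exact Nat.mul_mod_right _ _⟩]
      rw [gsum_zero_of r (mm + 1) (List.take mm t) (r + (mm+1) * kk0 + 1) ?_]
      · ring
      · intro j h1 h2
        rintro ⟨h3, h4⟩
        have htk : (List.take mm t).length ≤ mm := by
          rw [List.length_take]; omega
        obtain ⟨s, hs⟩ : ∃ s, j - r = (mm+1) * kk0 + s := ⟨j - r - (mm+1) * kk0, by omega⟩
        have hs1 : 1 ≤ s := by omega
        have hs2 : s < mm + 1 := by omega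
        rw [hs, Nat.mul_add_mod, Nat.mod_eq_of_lt hs2] at h4
        omega
    rw [hfirst, htlen]
    have hdlen : (List.drop m (x :: t)).length = q * m := by
      rw [List.length_drop]; omega
    rw [show r + m * kk0 + m = r + m * (kk0 + 1) from by ring]
    rw [ih (List.drop m (x :: t)) (kk0 + 1) hdlen]
    rw [List.range_succ_eq_map, List.map_cons, List.sum_cons, List.map_map]
    have hh : (List.map ((fun kk => (x :: t).getD (m * kk) 0) ∘ Nat.succ) (List.range q))
        = List.map (fun kk => (List.drop m (x :: t)).getD (m * kk) 0) (List.range q) := by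
      apply List.map_congr_left
      intro kk _
      simp only [Function.comp_apply, Nat.succ_eq_add_one, Nat.mul_succ]
      rw [List.getD_eq_getElem?_getD, List.getD_eq_getElem?_getD, List.getElem?_drop, Nat.add_comm]
    rw [hh, show m * 0 = 0 from by ring, List.getD_cons_zero]

theorem gsum_main (m : Nat) (hm : 0 < m) (a : List Int) :
    gsum (a.length % m) m 0 a
      = ((List.range (a.length / m)).map (fun kk => a.getD (a.length % m + m * kk) 0)).sum := by
  have hr0le : a.length % m ≤ a.length := Nat.mod_le _ _
  have h := gsum_append (a.length % m) m (List.take (a.length % m) a) (List.drop (a.length % m) a) 0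
  rw [List.take_append_drop] at h
  rw [h]
  have htake : (List.take (a.length % m) a).length = a.length % m := by
    rw [List.length_take]; omega
  rw [gsum_zero_of (a.length % m) m (List.take (a.length % m) a) 0 ?_]
  · rw [htake, zero_add, zero_add]
    have hdm := Nat.div_add_mod a.length m
    have hcm : (a.length / m) * m = m * (a.length / m) := Nat.mul_comm _ _
    have hdl : (List.drop (a.length % m) a).length = (a.length / m) * m := by
      rw [List.length_drop]; omega
    have hb := gsum_blocks (a.length % m) m hm (a.length / m) (List.drop (a.length % m) a) 0 hdl
    rw [show a.length % m + m * 0 = a.length % m from by ring] at hb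
    rw [hb]
    congr 1
    apply List.map_congr_left
    intro kk _
    rw [List.getD_eq_getElem?_getD, List.getD_eq_getElem?_getD, List.getElem?_drop]
  · intro j h1 h2 h3
    rw [htake] at h2
    omega

theorem foldB (r0 M : Nat) (hM : 0 < M) (cnt : Int → Nat) :
    ∀ (ks : List Int) (ans0 : Int) (p0 : Nat),
      ks.foldl (fun (st : Int × Int) v =>
          (st.1 + v * (Fm r0 M (st.2 + (cnt v : Int)) - Fm r0 M st.2), st.2 + (cnt v : Int)))
        (ans0, (p0 : Int))
      = (ans0 + gsum r0 M p0 (ks.flatMap (fun v => List.replicate (cnt v) v)),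
         ((p0 + (ks.flatMap (fun v => List.replicate (cnt v) v)).length : Nat) : Int)) := by
  intro ks
  induction ks with
  | nil => intro ans0 p0; simp [gsum]
  | cons v t ih =>
    intro ans0 p0
    rw [List.foldl_cons]
    have hcast : (p0 : Int) + ((cnt v : Nat) : Int) = ((p0 + cnt v : Nat) : Int) := by push_cast; ring
    simp only [hcast]
    rw [ih (ans0 + v * (Fm r0 M ((p0 + cnt v : Nat) : Int) - Fm r0 M (p0 : Int))) (p0 + cnt v)]
    rw [List.flatMap_cons, gsum_append, List.length_append, List.length_replicate]
    simp only [Prod.mk.injEq]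
    constructor
    · rw [← gsum_replicate r0 M hM v (cnt v) p0]
      ring
    · congr 1
      omega

-- a sorted-ascending list is the run-length expansion over its sorted distinct values
theorem flat_sorted : ∀ (keys : List Int), List.Pairwise (fun a b => a < b) keys →
    ∀ (s : List Int), (∀ x ∈ s, x ∈ keys) →
    PySem.List.sorted s (fun x => x) false = keys.flatMap (fun v => List.replicate (List.count v s) v) := by
  intro keys
  induction keys with
  | nil =>
    intro _ s hs
    have hs0 : s = [] := by
      cases s with
      | nil => rfl
      | cons x t => exact absurd (hs x (by simp)) (by simp)
    subst hs0
    have := (PySem.List.sorted_perm ([] : List Int) (fun x => x) false).eq_nil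
    simp [this]
  | cons v rest ih =>
    intro hp s hs
    have hvk : ∀ w ∈ rest, v < w := (List.pairwise_cons.mp hp).1
    have hpk : List.Pairwise (fun a b => a < b) rest := (List.pairwise_cons.mp hp).2
    have hmem' : ∀ x ∈ s.filter (fun x => !(x == v)), x ∈ rest := by
      intro x hx
      rw [List.mem_filter] at hx
      have hxv : x ≠ v := by simpa using hx.2
      rcases List.mem_cons.mp (hs x hx.1) with h | h
      · exact absurd h hxv
      · exact h
    have hihs := ih hpk (s.filter (fun x => !(x == v))) hmem'
    have hflat : rest.flatMap (fun w => List.replicate (List.count w s) w)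
        = rest.flatMap (fun w => List.replicate (List.count w (s.filter (fun x => !(x == v)))) w) := by
      rw [List.flatMap_def, List.flatMap_def]
      congr 1
      apply List.map_congr_left
      intro w hw
      rw [List.count_filter (by simp [(hvk w hw).ne'])]
    apply PySem.List.sorted_id_eq_of_perm_of_pairwise
    · rw [List.flatMap_cons, hflat, ← hihs, ← List.filter_beq v]
      exact ((List.Perm.refl _).append (PySem.List.sorted_perm _ _ _)).trans
        (List.filter_append_perm _ s)
    · rw [List.flatMap_cons, hflat, ← hihs]
      apply List.pairwise_append.mpr
      refine ⟨?_, ?_, ?_⟩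
      · exact List.pairwise_replicate.mpr (Or.inr (le_refl v))
      · exact PySem.List.sorted_pairwise _ (fun x => x)
      · intro x hx y hy
        have hxv : x = v := List.eq_of_mem_replicate hx
        have hys : y ∈ s.filter (fun x => !(x == v)) :=
          (PySem.List.mem_sorted _ _ _ y).mp hy
        subst hxv
        exact le_of_lt (hvk y (hmem' y hys))

theorem sum_map_range_reflect (f : Nat → Int) : ∀ q,
    ((List.range q).map (fun k => f (q - 1 - k))).sum = ((List.range q).map f).sum := by
  intro q
  induction q with
  | zero => simp
  | succ q ih =>
    conv_lhs => rw [List.range_succ_eq_map]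
    rw [List.map_cons, List.sum_cons, List.map_map]
    have ht : ((List.range q).map ((fun k => f (q + 1 - 1 - k)) ∘ Nat.succ)).sum
        = ((List.range q).map (fun k => f (q - 1 - k))).sum := by
      congr 1
      apply List.map_congr_left
      intro k _
      simp only [Function.comp_apply]
      congr 1
      omega
    rw [ht, ih, show q + 1 - 1 - 0 = q from rfl]
    rw [List.range_succ, List.map_append, List.sum_append]
    simp [add_comm]

theorem sum_map_mul_right_int (l : List Nat) (f : Nat → Int) (c : Int) :
    (l.map (fun x => f x * c)).sum = (l.map f).sum * c := by
  induction l with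
  | nil => simp
  | cons x t ih => simp [ih]; ring

-- B's value, in closed form
theorem Bchar (kk0 : Int) (M : Nat) (hM : 0 < M) (score : List Int) :
    solution_alt kk0 (M : Int) score
      = (((List.range (score.length / M)).map
          (fun kk => (PySem.List.sorted score (fun x => x) false).getD (score.length % M + M * kk) 0)).sum) * (M : Int) := by
  unfold solution_alt
  simp only [PySem.Dict.foldl_insert_getD_add_one_eq_counter, PySem.Dict.keys_counter,
    PySem.Dict.getD_counter, PySem.List.count_eq, PySem.List.len_eq, PySem.Int.mod_natCast]
  have hf := foldB (score.length % M) M hM (fun v => List.count v score)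
    (PySem.List.sorted (PySem.Set.ofList score) (fun x => x) false) 0 0
  simp only [Nat.cast_zero, zero_add] at hf
  have hfun : (fun (st : Int × Int) v =>
      (st.1 + v * ((if ((score.length % M : Nat) : Int) < st.2 + ((List.count v score : Nat) : Int) then
          PySem.Int.floordiv (st.2 + ((List.count v score : Nat) : Int) - ((score.length % M : Nat) : Int) + (M:Int) - 1) (M:Int) else 0)
        - (if ((score.length % M : Nat) : Int) < st.2 then
          PySem.Int.floordiv (st.2 - ((score.length % M : Nat) : Int) + (M:Int) - 1) (M:Int) else 0)),
        st.2 + ((List.count v score : Nat) : Int)))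
      = (fun (st : Int × Int) v =>
      (st.1 + v * (Fm ((score.length % M : Nat) : Int) ((M : Nat) : Int) (st.2 + ((List.count v score : Nat) : Int))
          - Fm ((score.length % M : Nat) : Int) ((M : Nat) : Int) st.2),
        st.2 + ((List.count v score : Nat) : Int))) := by
    funext st v
    simp only [Fm]
  rw [hfun, hf]
  have hflat := flat_sorted (PySem.List.sorted (PySem.Set.ofList score) (fun x => x) false)
    (PySem.List.sorted_ofList_pairwise_lt score) score
    (fun x hx => (PySem.List.mem_sorted _ _ _ x).mpr ((PySem.Set.mem_ofList score x).mpr hx))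
  rw [← hflat]
  have hlen : (PySem.List.sorted score (fun x => x) false).length = score.length :=
    PySem.List.length_sorted _ _ _
  have hg := gsum_main M hM (PySem.List.sorted score (fun x => x) false)
  rw [hlen] at hg
  rw [hg]

-- ===== VERDICT (by name: the statement is the Claim_ definition above) =====
theorem solution_spec : Claim_equal_solution := by
  intro k m score _ hm
  have hm1 : 1 ≤ m := hm
  unfold Spec_solution
  obtain ⟨M, rfl⟩ : ∃ M : Nat, m = (M:Int) := ⟨m.toNat, (Int.toNat_of_nonneg (by omega)).symm⟩
  have hM : 0 < M := by exact_mod_cast hm1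
  unfold solution
  simp only []
  set d := PySem.List.sorted score (fun x => x) true with hd
  set a := PySem.List.sorted score (fun x => x) false with ha
  have hdp : List.Pairwise (fun x y => y ≤ x) d := PySem.List.sorted_pairwise_rev score _
  rw [Aside d hdp M hM, Bchar k M hM score]
  have hrev : d = a.reverse := by
    have h1 : d.reverse = a := by
      apply PySem.List.eq_of_perm_of_pairwise_le_of_injective (fun x : Int => x) (fun x y h => h)
      · exact (List.reverse_perm d).trans ((PySem.List.sorted_perm score _ true).trans
          (PySem.List.sorted_perm score _ false).symm)
      · exact List.pairwise_reverse.mpr (PySem.List.sorted_pairwise_rev score _)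
      · exact PySem.List.sorted_pairwise score _
    rw [← h1, List.reverse_reverse]
  have hdl : d.length = score.length := PySem.List.length_sorted _ _ _
  have hal : a.length = score.length := PySem.List.length_sorted _ _ _
  rw [hdl]
  have hqr : M * (score.length / M) + score.length % M = score.length := Nat.div_add_mod _ _
  have hcongr : ∀ kk ∈ List.range (score.length / M),
      d.getD (M*kk + M - 1) 0 * (M:Int)
        = (fun j => a.getD (score.length % M + M * j) 0 * (M:Int)) (score.length / M - 1 - kk) := by
    intro kk hkk
    rw [List.mem_range] at hkk
    have hmul1 : M * kk + M * (score.length / M - 1 - kk) + M = M * (score.length / M) := by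
      rw [show M * kk + M * (score.length / M - 1 - kk) + M = M * (kk + (score.length / M - 1 - kk) + 1) from by ring,
        show kk + (score.length / M - 1 - kk) + 1 = score.length / M from by omega]
    simp only []
    rw [List.getD_eq_getElem?_getD, List.getD_eq_getElem?_getD, hrev,
      List.getElem?_reverse (by rw [hal]; omega), hal]
    have hidx : score.length - 1 - (M * kk + M - 1)
        = score.length % M + M * (score.length / M - 1 - kk) := by omega
    rw [hidx]
  rw [List.map_congr_left hcongr,
    sum_map_range_reflect (fun j => a.getD (score.length % M + M * j) 0 * (M:Int)) (score.length / M),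
    sum_map_mul_right_int]
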